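-- pv_equiv track=rewrite | github.com/Ace1928/word_forge | src/word_forge/database/database_manager.py | _categorize_relationship_types
-- ===== SOURCE A (Python) =====
-- from typing import (
--     Any,
--     Dict,
--     Iterator,
--     List,
--     Optional,
--     Protocol,
--     Tuple,
--     TypedDict,
--     TypeVar,
--     Union,
--     cast,
-- )
--
-- def _categorize_relationship_types(types: List[str]) -> Dict[str, List[str]]:
--     """
--     Categorize relationship types into semantic groups.
--
--     Args:
--         types: List of relationship types to categorize
--
--     Returns:
--         Dictionary mapping categories to lists of relationship types
--     """
--     categories: Dict[str, List[str]] = {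
--         "lexical": [],
--         "semantic": [],
--         "emotional": [],
--         "affective": [],
--         "other": [],
--     }
--
--     for rel_type in types:
--         if rel_type.startswith(("synonym", "antonym", "hypernym", "hyponym")):
--             categories["lexical"].append(rel_type)
--         elif rel_type.startswith(("related_to", "part_of", "has_part")):
--             categories["semantic"].append(rel_type)
--         elif rel_type.startswith(("evokes", "emotional_")):
--             categories["emotional"].append(rel_type)
--         elif rel_type.startswith(("positive_", "negative_", "high_", "low_")):
--             categories["affective"].append(rel_type)
--         else:
--             categories["other"].append(rel_type)
--
--     return categories
-- ===== SOURCE B (Python) =====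
-- def _categorize_relationship_types(types):
--     """Categorize relationship types into semantic groups (rules-table version)."""
--     rules = (
--         ("lexical", ("synonym", "antonym", "hypernym", "hyponym")),
--         ("semantic", ("related_to", "part_of", "has_part")),
--         ("emotional", ("evokes", "emotional_")),
--         ("affective", ("positive_", "negative_", "high_", "low_")),
--     )
--
--     def _category(rel_type):
--         for name, prefixes in rules:
--             if rel_type.startswith(prefixes):
--                 return name
--         return "other"
--
--     return {
--         c: [t for t in types if _category(t) == c]
--         for c in ("lexical", "semantic", "emotional", "affective", "other")
--     }
-- ===== Notes on version B (the rewrite author's own statement) =====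
-- stated objective: idiomatic
-- what changed: Replaces the single-pass branch ladder mutating a pre-built dict with a data-driven prefix-rules table plus a classification helper, and builds the result as a dict comprehension filtering the input once per category.
import Mathlib
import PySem

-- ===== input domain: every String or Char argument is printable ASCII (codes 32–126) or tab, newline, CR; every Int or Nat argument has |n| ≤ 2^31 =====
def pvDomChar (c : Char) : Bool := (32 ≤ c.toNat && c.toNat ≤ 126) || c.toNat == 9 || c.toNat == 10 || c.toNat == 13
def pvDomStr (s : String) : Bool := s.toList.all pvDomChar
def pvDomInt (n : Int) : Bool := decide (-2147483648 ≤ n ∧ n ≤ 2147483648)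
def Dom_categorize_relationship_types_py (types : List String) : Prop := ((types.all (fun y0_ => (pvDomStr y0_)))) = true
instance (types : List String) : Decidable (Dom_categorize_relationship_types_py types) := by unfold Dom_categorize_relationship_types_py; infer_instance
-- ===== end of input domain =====

-- B replaces A's branch ladder over a mutated dict with a prefix-rules table, a classification
-- helper, and one filter of the input per category (idiomatic; same output, same O(n) cost).

-- Python's s.startswith((p1, …, pk)): true iff some pi is a prefix (exact; shared by both ports).
def pyStartswithAny (s : String) (ps : List String) : Bool :=
  ps.any (fun p => PySem.Str.startswith s p)

-- ===== PORT A =====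
-- A's loop body (the if/elif ladder appending rel_type to its category)
def pvStepA (categories : PySem.Dict String (List String)) (rel_type : String) :
    PySem.Dict String (List String) :=
  if pyStartswithAny rel_type ["synonym", "antonym", "hypernym", "hyponym"] then
    categories.modify "lexical" [] (· ++ [rel_type])
  else if pyStartswithAny rel_type ["related_to", "part_of", "has_part"] then
    categories.modify "semantic" [] (· ++ [rel_type])
  else if pyStartswithAny rel_type ["evokes", "emotional_"] then
    categories.modify "emotional" [] (· ++ [rel_type])
  else if pyStartswithAny rel_type ["positive_", "negative_", "high_", "low_"] then
    categories.modify "affective" [] (· ++ [rel_type])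
  else
    categories.modify "other" [] (· ++ [rel_type])

def categorize_relationship_types_py (types : List String) : List (String × List String) :=
  (types.foldl pvStepA
    (PySem.Dict.mk
      [("lexical", []), ("semantic", []), ("emotional", []), ("affective", []), ("other", [])])).items

-- ===== PORT B =====
def pvRules : List (String × List String) :=
  [("lexical", ["synonym", "antonym", "hypernym", "hyponym"]),
   ("semantic", ["related_to", "part_of", "has_part"]),
   ("emotional", ["evokes", "emotional_"]),
   ("affective", ["positive_", "negative_", "high_", "low_"])]

-- the `for name, prefixes in rules: … return name / return "other"` loop of Source B
def pvCategory (rel_type : String) : List (String × List String) → String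
  | [] => "other"
  | (name, prefixes) :: rest =>
      if pyStartswithAny rel_type prefixes then name else pvCategory rel_type rest

def categorize_relationship_types_py_alt (types : List String) : List (String × List String) :=
  ["lexical", "semantic", "emotional", "affective", "other"].map
    (fun c => (c, types.filter (fun t => pvCategory t pvRules == c)))

-- ===== PRECONDITION & SPEC =====
def Spec_categorize_relationship_types_py (types : List String) (out : List (String × List String)) : Prop := out = categorize_relationship_types_py_alt types
instance (types : List String) (out : List (String × List String)) : Decidable (Spec_categorize_relationship_types_py types out) := by unfold Spec_categorize_relationship_types_py; infer_instance

-- ===== CLAIM (what is proved, stated in full; the proofs are below) =====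
def Claim_equal_categorize_relationship_types_py : Prop := ∀ (types : List String), Dom_categorize_relationship_types_py types → Spec_categorize_relationship_types_py types (categorize_relationship_types_py types)

-- ===== LEMMAS AND PROOFS =====

-- The fold of A, started from the five fixed keys holding accumulators a…e, appends to each key
-- exactly the elements B's classifier sends to that key.
lemma fold_invariant (ts : List String) :
    ∀ (a b c d e : List String),
      ts.foldl pvStepA
        (PySem.Dict.mk
          [("lexical", a), ("semantic", b), ("emotional", c), ("affective", d), ("other", e)]) =
      PySem.Dict.mk
        [("lexical", a ++ ts.filter (fun t => pvCategory t pvRules == "lexical")),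
         ("semantic", b ++ ts.filter (fun t => pvCategory t pvRules == "semantic")),
         ("emotional", c ++ ts.filter (fun t => pvCategory t pvRules == "emotional")),
         ("affective", d ++ ts.filter (fun t => pvCategory t pvRules == "affective")),
         ("other", e ++ ts.filter (fun t => pvCategory t pvRules == "other"))] := by
  induction ts with
  | nil => intro a b c d e; simp
  | cons x xs ih =>
    intro a b c d e
    rw [List.foldl_cons]
    by_cases h1 : pyStartswithAny x ["synonym", "antonym", "hypernym", "hyponym"] = true
    · have hstep : pvStepA (PySem.Dict.mk
          [("lexical", a), ("semantic", b), ("emotional", c), ("affective", d), ("other", e)]) x =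
        PySem.Dict.mk
          [("lexical", a ++ [x]), ("semantic", b), ("emotional", c), ("affective", d), ("other", e)] := by
        simp [pvStepA, h1, PySem.Dict.modify, PySem.Dict.insert, PySem.Dict.getD, PySem.Dict.get?]
      have hc : pvCategory x pvRules = "lexical" := by simp [pvCategory, pvRules, h1]
      rw [hstep, ih]
      simp [hc]
    · by_cases h2 : pyStartswithAny x ["related_to", "part_of", "has_part"] = true
      · have hstep : pvStepA (PySem.Dict.mk
            [("lexical", a), ("semantic", b), ("emotional", c), ("affective", d), ("other", e)]) x =
          PySem.Dict.mk
            [("lexical", a), ("semantic", b ++ [x]), ("emotional", c), ("affective", d), ("other", e)] := by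
          simp [pvStepA, h1, h2, PySem.Dict.modify, PySem.Dict.insert, PySem.Dict.getD, PySem.Dict.get?]
        have hc : pvCategory x pvRules = "semantic" := by simp [pvCategory, pvRules, h1, h2]
        rw [hstep, ih]
        simp [hc]
      · by_cases h3 : pyStartswithAny x ["evokes", "emotional_"] = true
        · have hstep : pvStepA (PySem.Dict.mk
              [("lexical", a), ("semantic", b), ("emotional", c), ("affective", d), ("other", e)]) x =
            PySem.Dict.mk
              [("lexical", a), ("semantic", b), ("emotional", c ++ [x]), ("affective", d), ("other", e)] := by
            simp [pvStepA, h1, h2, h3, PySem.Dict.modify, PySem.Dict.insert, PySem.Dict.getD, PySem.Dict.get?]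
          have hc : pvCategory x pvRules = "emotional" := by simp [pvCategory, pvRules, h1, h2, h3]
          rw [hstep, ih]
          simp [hc]
        · by_cases h4 : pyStartswithAny x ["positive_", "negative_", "high_", "low_"] = true
          · have hstep : pvStepA (PySem.Dict.mk
                [("lexical", a), ("semantic", b), ("emotional", c), ("affective", d), ("other", e)]) x =
              PySem.Dict.mk
                [("lexical", a), ("semantic", b), ("emotional", c), ("affective", d ++ [x]), ("other", e)] := by
              simp [pvStepA, h1, h2, h3, h4, PySem.Dict.modify, PySem.Dict.insert, PySem.Dict.getD, PySem.Dict.get?]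
            have hc : pvCategory x pvRules = "affective" := by simp [pvCategory, pvRules, h1, h2, h3, h4]
            rw [hstep, ih]
            simp [hc]
          · have hstep : pvStepA (PySem.Dict.mk
                [("lexical", a), ("semantic", b), ("emotional", c), ("affective", d), ("other", e)]) x =
              PySem.Dict.mk
                [("lexical", a), ("semantic", b), ("emotional", c), ("affective", d), ("other", e ++ [x])] := by
              simp [pvStepA, h1, h2, h3, h4, PySem.Dict.modify, PySem.Dict.insert, PySem.Dict.getD, PySem.Dict.get?]
            have hc : pvCategory x pvRules = "other" := by simp [pvCategory, pvRules, h1, h2, h3, h4]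
            rw [hstep, ih]
            simp [hc]

-- ===== VERDICT (by name: the statement is the Claim_ definition above) =====
theorem categorize_relationship_types_py_spec : Claim_equal_categorize_relationship_types_py := by
  intro types _
  unfold Spec_categorize_relationship_types_py
  unfold categorize_relationship_types_py categorize_relationship_types_py_alt
  rw [fold_invariant types [] [] [] [] []]
  simp
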